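-- pv_equiv track=rewrite | github.com/Chun-Bae/Baekjoon | Python/백준/Silver/4659. 비밀번호 발음하기/비밀번호 발음하기.py | is_acceptable
-- ===== SOURCE A (Python) =====
-- def is_acceptable(password):
--     vowels = "aeiou"
--     has_vowel = False
--     consecutive_vowels = 0
--     consecutive_consonants = 0
--     prev_char = ""
--
--     for i, char in enumerate(password):
--         if char in vowels:
--             has_vowel = True
--             consecutive_vowels += 1
--             consecutive_consonants = 0
--         else:
--             consecutive_consonants += 1
--             consecutive_vowels = 0
--
--         if consecutive_vowels == 3 or consecutive_consonants == 3:
--             return False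
--
--         if i > 0 and char == prev_char and char not in "eo":
--             return False
--
--         prev_char = char
--
--     return has_vowel
-- ===== SOURCE B (Python) =====
-- def is_acceptable(password):
--     vowels = "aeiou"
--     has_vowel = any(c in vowels for c in password)
--     triple = any((a in vowels) == (b in vowels) == (c in vowels)
--                  for a, b, c in zip(password, password[1:], password[2:]))
--     bad_double = any(a == b and a not in "eo"
--                      for a, b in zip(password, password[1:]))
--     return has_vowel and not triple and not bad_double
-- ===== Notes on version B (the rewrite author's own statement) =====
-- stated objective: simpler
-- what changed: Replaces the single stateful pass (run counters, prev char, early returns) by three independent declarative scans: any vowel, any window of three same-class chars, any disallowed doubled pair.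
import Mathlib
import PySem

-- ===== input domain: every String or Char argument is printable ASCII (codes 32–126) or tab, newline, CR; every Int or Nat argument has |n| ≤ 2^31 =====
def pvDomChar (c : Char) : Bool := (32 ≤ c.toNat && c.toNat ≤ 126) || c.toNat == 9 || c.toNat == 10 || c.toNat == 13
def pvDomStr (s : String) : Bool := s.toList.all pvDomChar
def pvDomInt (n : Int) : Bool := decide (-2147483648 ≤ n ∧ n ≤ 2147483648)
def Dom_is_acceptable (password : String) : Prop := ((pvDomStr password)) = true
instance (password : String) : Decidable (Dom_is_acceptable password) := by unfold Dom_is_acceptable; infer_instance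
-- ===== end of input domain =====

-- B replaces A's single stateful pass (run counters, prev char, early returns) by three
-- independent declarative scans (any vowel / same-class triple window / bad doubled pair); simpler, not faster.


-- ===== PORT A =====
-- shared helper: membership in "aeiou" / "eo" (both Pythons test the same literals)
def isVowel (c : Char) : Bool := ['a','e','i','o','u'].contains c
def inEO (c : Char) : Bool := ['e','o'].contains c

-- A's loop, step for step: has_vowel / consecutive counters / prev_char state,
-- early `return False` on a 3-run or a disallowed double (i > 0 ↔ prev = some _).
def loopA : List Char → Bool → Nat → Nat → Option Char → Bool
  | [], hv, _, _, _ => hv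
  | c :: rest, hv, cv, cc, prev =>
    let v := isVowel c
    let hv' := hv || v
    let cv' := if v then cv + 1 else 0
    let cc' := if v then 0 else cc + 1
    if cv' == 3 || cc' == 3 then false
    else if (match prev with | some p => c == p | none => false) && !inEO c then false
    else loopA rest hv' cv' cc' (some c)

def is_acceptable (password : String) : Bool :=
  loopA password.toList false 0 0 none

-- ===== PORT B =====
-- B's three scans: zip(s, s[1:], s[2:]) windows as a sliding pattern-match recursion.
def wt : List Char → Bool
  | a :: b :: c :: rest =>
      ((isVowel a == isVowel b) && (isVowel b == isVowel c)) || wt (b :: c :: rest)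
  | _ => false

def pairBad : List Char → Bool
  | a :: b :: rest => (a == b && !inEO a) || pairBad (b :: rest)
  | _ => false

def is_acceptable_alt (password : String) : Bool :=
  password.toList.any isVowel && !wt password.toList && !pairBad password.toList

-- ===== PRECONDITION & SPEC =====
def Spec_is_acceptable (password : String) (out : Bool) : Prop := out = is_acceptable_alt password
instance (password : String) (out : Bool) : Decidable (Spec_is_acceptable password out) := by unfold Spec_is_acceptable; infer_instance

-- ===== CLAIM (what is proved, stated in full; the proofs are below) =====
def Claim_equal_is_acceptable : Prop := ∀ (password : String), Dom_is_acceptable password → Spec_is_acceptable password (is_acceptable password)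

-- ===== LEMMAS AND PROOFS =====
-- generalized "triple run completes" predicate mirroring A's counters
def T : Nat → Nat → List Char → Bool
  | _, _, [] => false
  | cv, cc, c :: rest =>
    if isVowel c then ((cv + 1 == 3) || T (cv + 1) 0 rest)
    else ((cc + 1 == 3) || T 0 (cc + 1) rest)

-- generalized "bad double occurs" predicate mirroring A's prev_char
def Dl : Option Char → List Char → Bool
  | _, [] => false
  | prev, c :: rest =>
    ((match prev with | some p => c == p | none => false) && !inEO c) || Dl (some c) rest

theorem loopA_eq (cs : List Char) : ∀ (hv : Bool) (cv cc : Nat) (prev : Option Char),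
    loopA cs hv cv cc prev = ((hv || cs.any isVowel) && !T cv cc cs && !Dl prev cs) := by
  induction cs with
  | nil => intro hv cv cc prev; simp [loopA, T, Dl]
  | cons c rest ih =>
    intro hv cv cc prev
    cases hvw : isVowel c
    · by_cases h3 : cc = 2
      · simp [loopA, T, hvw, h3]
      · have hne : (cc + 1 == 3) = false := by simp; omega
        by_cases hd : ((match prev with | some p => c == p | none => false) && !inEO c) = true
        · simp [loopA, T, Dl, hvw, hne, hd]
        · simp only [Bool.not_eq_true] at hd
          simp [loopA, T, Dl, hvw, hne, hd, ih]
    · by_cases h3 : cv = 2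
      · simp [loopA, T, hvw, h3]
      · have hne : (cv + 1 == 3) = false := by simp; omega
        by_cases hd : ((match prev with | some p => c == p | none => false) && !inEO c) = true
        · simp [loopA, T, Dl, hvw, hne, hd]
        · simp only [Bool.not_eq_true] at hd
          simp [loopA, T, Dl, hvw, hne, hd, ih]

theorem T_two (cs : List Char) : ∀ (a b : Char),
    T (if isVowel b then (if isVowel a then 2 else 1) else 0)
      (if isVowel b then 0 else (if isVowel a then 1 else 2)) cs = wt (a :: b :: cs) := by
  induction cs with
  | nil => intro a b; by_cases ha : isVowel a <;> by_cases hb : isVowel b <;> simp [T, wt]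
  | cons c rest ih =>
    intro a b
    by_cases ha : isVowel a <;> by_cases hb : isVowel b <;> by_cases hc : isVowel c <;>
      simp [T, wt, ha, hb, hc, ← ih]

theorem T_start (cs : List Char) : T 0 0 cs = wt cs := by
  match cs with
  | [] => simp [T, wt]
  | [a] => by_cases ha : isVowel a <;> simp [T, wt, ha]
  | a :: b :: rest =>
    by_cases ha : isVowel a <;> by_cases hb : isVowel b <;>
      simp [T, ha, hb, ← T_two rest a b]

theorem Dl_some (cs : List Char) : ∀ (p : Char), Dl (some p) cs = pairBad (p :: cs) := by
  induction cs with
  | nil => intro p; simp [Dl, pairBad]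
  | cons c rest ih =>
    intro p
    by_cases h : p = c
    · subst h; simp [Dl, pairBad, ih]
    · have h1 : (c == p) = false := by simp [Ne.symm h]
      have h2 : (p == c) = false := by simp [h]
      simp [Dl, pairBad, ih, h1, h2]

theorem Dl_none (cs : List Char) : Dl none cs = pairBad cs := by
  cases cs with
  | nil => simp [Dl, pairBad]
  | cons c rest => simp [Dl, Dl_some]

-- ===== VERDICT (by name: the statement is the Claim_ definition above) =====
theorem is_acceptable_spec : Claim_equal_is_acceptable := by
  intro password _
  unfold Spec_is_acceptable is_acceptable is_acceptable_alt
  rw [loopA_eq, T_start, Dl_none]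
  simp
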